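-- pv_equiv track=rewrite | github.com/gkevinb/MasterThesis | faultTreeReconstruction.py | reverse_events_and_sets
-- ===== SOURCE A (Python) =====
-- EMPTY_LIST = list()
--
-- def reverse_events_and_sets(events, sets):
--     top_event_length = len(events[-1])
--     grouped_events = []
--     grouped_sets = []
--     for i in range(1, top_event_length + 1):
--         i_event_group = []
--         i_set_group = []
--         for j in range(len(events)):
--             if len(events[j]) == i:
--                 i_event_group.append(events[j])
--                 i_set_group.append(sets[j])
--
--         grouped_events.append(i_event_group)
--         grouped_sets.append(i_set_group)
--
--     grouped_events.reverse()
--     grouped_sets.reverse()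
--
--     events = []
--     sets = []
--
--     for i in range(len(grouped_events)):
--         if grouped_events[i] != EMPTY_LIST:
--             for event_ in grouped_events[i]:
--                 events.append(event_)
--         if grouped_events[i] != EMPTY_LIST:
--             for set_ in grouped_sets[i]:
--                 sets.append(set_)
--
--     return events, sets
-- ===== SOURCE B (Python) =====
-- def reverse_events_and_sets(events, sets):
--     top = len(events[-1])
--     buckets = {}
--     for e, s in zip(events, sets):
--         n = len(e)
--         if 1 <= n <= top:
--             pair = buckets.setdefault(n, ([], []))
--             pair[0].append(e)
--             pair[1].append(s)
--     out_events = []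
--     out_sets = []
--     for n in range(top, 0, -1):
--         if n in buckets:
--             pair = buckets[n]
--             out_events += pair[0]
--             out_sets += pair[1]
--     return out_events, out_sets
-- ===== Notes on version B (the rewrite author's own statement) =====
-- stated objective: alternative
-- what changed: A rescans the whole events list once per length 1..len(events[-1]) and then concatenates the reversed groups; B instead makes a single pass over zip(events, sets), bucketing the pairs into a dict keyed by event length, and concatenates the buckets in descending length order.
import Mathlib
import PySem

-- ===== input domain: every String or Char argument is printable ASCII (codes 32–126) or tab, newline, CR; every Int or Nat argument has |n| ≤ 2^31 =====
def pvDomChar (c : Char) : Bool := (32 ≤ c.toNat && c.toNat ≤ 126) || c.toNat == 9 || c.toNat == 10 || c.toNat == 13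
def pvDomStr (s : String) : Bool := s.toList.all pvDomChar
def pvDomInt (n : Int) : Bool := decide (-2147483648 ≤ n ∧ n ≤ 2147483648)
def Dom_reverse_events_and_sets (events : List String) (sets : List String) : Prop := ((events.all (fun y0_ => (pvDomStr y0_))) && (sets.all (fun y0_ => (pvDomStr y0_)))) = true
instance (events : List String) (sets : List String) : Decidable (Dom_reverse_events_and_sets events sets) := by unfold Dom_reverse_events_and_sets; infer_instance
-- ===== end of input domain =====

-- B replaces A's per-length rescans of events by one dict-bucketing pass over the zipped
-- (event, set) pairs, concatenating the buckets in descending length order.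

-- ===== PORT A =====
-- body of A once `last = events[-1]` has been read (A raises IndexError on empty events)
def pvAbody (events sets : List String) (last : String) : List String × List String :=
  let top := PySem.Str.len last
  let grouped :=
    (PySem.List.pyRange 1 (top + 1)).foldl
      (fun (g : List (List String) × List (List String)) i =>
        let inner :=
          (PySem.List.pyRange 0 (PySem.List.len events)).foldl
            (fun (st : List String × List String) j =>
              if PySem.Str.len (PySem.List.pyGetD events j "") == i then
                (st.1 ++ [PySem.List.pyGetD events j ""], st.2 ++ [PySem.List.pyGetD sets j ""])
              else st)
            ([], [])
        (g.1 ++ [inner.1], g.2 ++ [inner.2]))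
      ([], [])
  let ge := grouped.1.reverse
  let gs := grouped.2.reverse
  (PySem.List.pyRange 0 (PySem.List.len ge)).foldl
    (fun (out : List String × List String) i =>
      ((if PySem.List.pyGetD ge i [] ≠ [] then out.1 ++ PySem.List.pyGetD ge i [] else out.1),
       (if PySem.List.pyGetD ge i [] ≠ [] then out.2 ++ PySem.List.pyGetD gs i [] else out.2)))
    ([], [])

def reverse_events_and_sets (events : List String) (sets : List String) : List String × List String :=
  match PySem.List.pyGet? events (-1) with
  | none => ([], [])  -- IndexError on empty events; excluded by Pre_
  | some last => pvAbody events sets last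

-- ===== PORT B =====
-- body of B once `last = events[-1]` has been read (B raises IndexError on empty events)
def pvBbody (events sets : List String) (last : String) : List String × List String :=
  let top := PySem.Str.len last
  let buckets : PySem.Dict Int (List String × List String) :=
    (events.zip sets).foldl
      (fun d p =>
        if 1 ≤ PySem.Str.len p.1 ∧ PySem.Str.len p.1 ≤ top then
          d.modify (PySem.Str.len p.1) ([], []) (fun q => (q.1 ++ [p.1], q.2 ++ [p.2]))
        else d)
      PySem.Dict.empty
  (PySem.List.pyRange top 0 (-1)).foldl
    (fun (out : List String × List String) n =>
      if buckets.contains n then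
        (out.1 ++ (buckets.getD n ([], [])).1, out.2 ++ (buckets.getD n ([], [])).2)
      else out)
    ([], [])

def reverse_events_and_sets_alt (events : List String) (sets : List String) : List String × List String :=
  match PySem.List.pyGet? events (-1) with
  | none => ([], [])  -- IndexError on empty events; excluded by Pre_
  | some last => pvBbody events sets last

-- ===== PRECONDITION & SPEC =====
-- Pre_ is exactly the set of inputs on which the Python A returns normally: events nonempty
-- (else events[-1] raises IndexError), and no event at an index ≥ len(sets) has a length in
-- 1..len(events[-1]) (on such an event A executes sets[j], which raises IndexError).
def Pre_reverse_events_and_sets (events : List String) (sets : List String) : Prop :=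
  events ≠ [] ∧ ∀ e ∈ events.drop sets.length,
    ¬(1 ≤ PySem.Str.len e ∧ PySem.Str.len e ≤ PySem.Str.len (PySem.List.pyGetD events (-1) ""))
instance (events : List String) (sets : List String) : Decidable (Pre_reverse_events_and_sets events sets) := by unfold Pre_reverse_events_and_sets; infer_instance
def pvWitness_reverse_events_and_sets : List String × List String := (["a", "bb"], ["x", "y"])

def Spec_reverse_events_and_sets (events : List String) (sets : List String) (out : List String × List String) : Prop := out = reverse_events_and_sets_alt events sets
instance (events : List String) (sets : List String) (out : List String × List String) : Decidable (Spec_reverse_events_and_sets events sets out) := by unfold Spec_reverse_events_and_sets; infer_instance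

-- ===== CLAIM (what is proved, stated in full; the proofs are below) =====
def Claim_equal_reverse_events_and_sets : Prop := ∀ (events : List String) (sets : List String), Dom_reverse_events_and_sets events sets → Pre_reverse_events_and_sets events sets → Spec_reverse_events_and_sets events sets (reverse_events_and_sets events sets)

-- ===== LEMMAS AND PROOFS =====

-- the events (resp. sets) of the zipped pairs whose event has length i, in order
def pvGroupF (events sets : List String) (i : Int) : List String :=
  ((events.zip sets).filter (fun p => PySem.Str.len p.1 == i)).map Prod.fst
def pvGroupS (events sets : List String) (i : Int) : List String :=
  ((events.zip sets).filter (fun p => PySem.Str.len p.1 == i)).map Prod.snd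

lemma pv_foldl_id {α β : Type} (l : List α) (init : β) :
    l.foldl (fun s _ => s) init = init := by
  induction l generalizing init <;> simp_all [List.foldl]

-- the pair-accumulator fold over zipped pairs selecting the events of length i
lemma pv_pairfold (i : Int) (ps : List (String × String)) (accE accS : List String) :
    ps.foldl
      (fun (st : List String × List String) p =>
        if PySem.Str.len p.1 == i then (st.1 ++ [p.1], st.2 ++ [p.2]) else st)
      (accE, accS)
    = (accE ++ (ps.filter (fun p => PySem.Str.len p.1 == i)).map Prod.fst,
       accS ++ (ps.filter (fun p => PySem.Str.len p.1 == i)).map Prod.snd) := by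
  induction ps generalizing accE accS with
  | nil => simp
  | cons p t ih =>
    simp only [List.foldl_cons, List.filter_cons]
    by_cases hc : (PySem.Str.len p.1 == i) = true
    · rw [if_pos hc, if_pos hc, ih]; simp
    · rw [if_neg hc, if_neg hc, ih]

-- the pair-accumulator fold that appends one group per length
lemma pv_groupfold (f1 f2 : Int → List String) (l : List Int) (a b : List (List String)) :
    l.foldl (fun (g : List (List String) × List (List String)) i =>
        (g.1 ++ [f1 i], g.2 ++ [f2 i])) (a, b)
    = (a ++ l.map f1, b ++ l.map f2) := by
  induction l generalizing a b with
  | nil => simp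
  | cons x t ih => simp [List.foldl_cons, ih]

-- the pair-accumulator fold that extends both outputs
lemma pv_extfold (f1 f2 : Int → List String) (l : List Int) (a b : List String) :
    l.foldl (fun (out : List String × List String) x =>
        (out.1 ++ f1 x, out.2 ++ f2 x)) (a, b)
    = (a ++ l.flatMap f1, b ++ l.flatMap f2) := by
  induction l generalizing a b with
  | nil => simp
  | cons x t ih => simp [List.foldl_cons, ih]

lemma pv_group_nil {events sets : List String} {i : Int}
    (h : pvGroupF events sets i = []) : pvGroupS events sets i = [] := by
  simp only [pvGroupF, pvGroupS, List.map_eq_nil_iff] at *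
  exact h

-- A's inner loop over all indices of events equals the filtered zip groups (for 1 ≤ i ≤ top,
-- using that events past len(sets) have no length in 1..top)
lemma pv_inner (events sets : List String) (top i : Int)
    (h1 : 1 ≤ i) (h2 : i ≤ top)
    (hpre : ∀ e ∈ events.drop sets.length,
      ¬(1 ≤ PySem.Str.len e ∧ PySem.Str.len e ≤ top)) :
    (PySem.List.pyRange 0 (PySem.List.len events)).foldl
      (fun (st : List String × List String) j =>
        if PySem.Str.len (PySem.List.pyGetD events j "") == i then
          (st.1 ++ [PySem.List.pyGetD events j ""], st.2 ++ [PySem.List.pyGetD sets j ""])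
        else st)
      ([], [])
    = (pvGroupF events sets i, pvGroupS events sets i) := by
  have hzlen : (events.zip sets).length = min events.length sets.length := List.length_zip
  have hmle : ((events.zip sets).length : Int) ≤ PySem.List.len events := by
    rw [PySem.List.len_eq]; omega
  rw [PySem.List.pyRange_one_append 0 ((events.zip sets).length : Int) (PySem.List.len events)
      (Int.natCast_nonneg _) hmle, List.foldl_append]
  have part1 :
      (PySem.List.pyRange 0 ((events.zip sets).length : Int)).foldl
        (fun (st : List String × List String) j =>
          if PySem.Str.len (PySem.List.pyGetD events j "") == i then
            (st.1 ++ [PySem.List.pyGetD events j ""], st.2 ++ [PySem.List.pyGetD sets j ""])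
          else st)
        ([], [])
      = (pvGroupF events sets i, pvGroupS events sets i) := by
    rw [PySem.List.foldl_congr_mem _ _
      (fun (st : List String × List String) j =>
        (fun (st : List String × List String) (p : String × String) =>
          if PySem.Str.len p.1 == i then (st.1 ++ [p.1], st.2 ++ [p.2]) else st)
          st (PySem.List.pyGetD (events.zip sets) j ("", ""))) _ ?_]
    · rw [show ((events.zip sets).length : Int) = PySem.List.len (events.zip sets) from
        (PySem.List.len_eq _).symm]
      rw [PySem.List.foldl_pyRange_zero_pyGetD (events.zip sets) ("", "")
        (fun (st : List String × List String) (p : String × String) =>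
          if PySem.Str.len p.1 == i then (st.1 ++ [p.1], st.2 ++ [p.2]) else st) ([], [])]
      rw [pv_pairfold]
      simp [pvGroupF, pvGroupS]
    · intro st j hj
      rw [PySem.List.mem_pyRange_one] at hj
      obtain ⟨hj0, hjz⟩ := hj
      have hje : j < (events.length : Int) := by omega
      have hjs : j < (sets.length : Int) := by omega
      have hjzn : j.toNat < (events.zip sets).length := by omega
      beta_reduce
      rw [PySem.List.pyGetD_eq_getElem _ _ hj0 hje,
          PySem.List.pyGetD_eq_getElem _ _ hj0 hjs,
          PySem.List.pyGetD_eq_getElem (events.zip sets) ("", "") hj0 (by omega),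
          List.getElem_zip]
  rw [part1]
  refine Eq.trans (PySem.List.foldl_congr_mem _ _ (fun st _ => st) _ ?_) (pv_foldl_id _ _)
  intro st j hj
  rw [PySem.List.mem_pyRange_one] at hj
  obtain ⟨hjz, hje⟩ := hj
  rw [PySem.List.len_eq] at hje
  have hj0 : 0 ≤ j := le_trans (Int.natCast_nonneg _) hjz
  have hsl : sets.length ≤ j.toNat := by omega
  have hjn : j.toNat < events.length := by omega
  have hmem : events[j.toNat] ∈ events.drop sets.length := by
    have : events[j.toNat] = (events.drop sets.length)[j.toNat - sets.length]'(by
      simp [List.length_drop]; omega) := by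
      rw [List.getElem_drop]; congr 1; omega
    rw [this]; exact List.getElem_mem _
  have hnlen := hpre _ hmem
  rw [PySem.List.pyGetD_eq_getElem _ _ hj0 (by omega)]
  have hfalse : (PySem.Str.len events[j.toNat] == i) = false := by
    apply beq_eq_false_iff_ne.mpr
    intro hh
    exact hnlen ⟨by omega, by omega⟩
  rw [hfalse]
  simp

-- A's whole body equals the groups of lengths top, top-1, …, 1 concatenated
lemma pv_A_canon (events sets : List String) (last : String)
    (hpre : ∀ e ∈ events.drop sets.length,
      ¬(1 ≤ PySem.Str.len e ∧ PySem.Str.len e ≤ PySem.Str.len last)) :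
    pvAbody events sets last =
      ((PySem.List.pyRange 1 (PySem.Str.len last + 1)).reverse.flatMap (pvGroupF events sets),
       (PySem.List.pyRange 1 (PySem.Str.len last + 1)).reverse.flatMap (pvGroupS events sets)) := by
  unfold pvAbody
  simp only []
  rw [PySem.List.foldl_congr_mem _ _
    (fun (g : List (List String) × List (List String)) i =>
      (g.1 ++ [pvGroupF events sets i], g.2 ++ [pvGroupS events sets i])) _ ?_]
  · rw [pv_groupfold]
    simp only [List.nil_append, ← List.map_reverse]
    set rlist := (PySem.List.pyRange 1 (PySem.Str.len last + 1)).reverse with hrl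
    rw [show PySem.List.len (rlist.map (pvGroupF events sets)) = PySem.List.len rlist from by
      simp [PySem.List.len_eq]]
    rw [PySem.List.foldl_congr_mem _ _
      (fun (out : List String × List String) j =>
        (fun (out : List String × List String) (x : Int) =>
          (out.1 ++ pvGroupF events sets x, out.2 ++ pvGroupS events sets x))
          out (PySem.List.pyGetD rlist j 0)) _ ?_]
    · rw [show PySem.List.len rlist = PySem.List.len rlist from rfl]
      rw [PySem.List.foldl_pyRange_zero_pyGetD rlist 0
        (fun (out : List String × List String) (x : Int) =>
          (out.1 ++ pvGroupF events sets x, out.2 ++ pvGroupS events sets x)) ([], [])]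
      rw [pv_extfold]
      simp
    · intro out j hj
      rw [PySem.List.mem_pyRange_one] at hj
      obtain ⟨hj0, hjlt⟩ := hj
      rw [PySem.List.len_eq] at hjlt
      beta_reduce
      rw [PySem.List.pyGetD_eq_getElem (rlist.map (pvGroupF events sets)) [] hj0 (by simp; omega),
          PySem.List.pyGetD_eq_getElem (rlist.map (pvGroupS events sets)) [] hj0 (by simp; omega),
          PySem.List.pyGetD_eq_getElem rlist 0 hj0 (by omega),
          List.getElem_map, List.getElem_map]
      by_cases h0 : pvGroupF events sets rlist[j.toNat] = []
      · simp [h0, pv_group_nil h0]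
      · simp [h0]
  · intro g i hi
    rw [PySem.List.mem_pyRange_one] at hi
    rw [pv_inner events sets (PySem.Str.len last) i hi.1 (by omega) hpre]

-- B's bucket dict after the grouping pass, looked up at any key
lemma pv_bucket (top : Int) (ps : List (String × String))
    (d : PySem.Dict Int (List String × List String)) (n : Int) :
    ((ps.foldl
      (fun d p =>
        if 1 ≤ PySem.Str.len p.1 ∧ PySem.Str.len p.1 ≤ top then
          d.modify (PySem.Str.len p.1) ([], []) (fun q => (q.1 ++ [p.1], q.2 ++ [p.2]))
        else d)
      d).getD n ([], []))
    = ((d.getD n ([], [])).1 ++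
        (ps.filter (fun p => PySem.Str.len p.1 == n && decide (1 ≤ n) && decide (n ≤ top))).map Prod.fst,
       (d.getD n ([], [])).2 ++
        (ps.filter (fun p => PySem.Str.len p.1 == n && decide (1 ≤ n) && decide (n ≤ top))).map Prod.snd) := by
  induction ps generalizing d with
  | nil => simp
  | cons p t ih =>
    simp only [List.foldl_cons, List.filter_cons]
    by_cases hc : 1 ≤ PySem.Str.len p.1 ∧ PySem.Str.len p.1 ≤ top
    · rw [if_pos hc, ih, PySem.Dict.getD_modify]
      by_cases he : n = PySem.Str.len p.1
      · subst he
        rw [if_pos rfl]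
        have hcond : (PySem.Str.len p.1 == PySem.Str.len p.1 && decide (1 ≤ PySem.Str.len p.1)
            && decide (PySem.Str.len p.1 ≤ top)) = true := by
          simp only [beq_self_eq_true, Bool.true_and, Bool.and_eq_true, decide_eq_true_eq]
          exact ⟨hc.1, hc.2⟩
        rw [if_pos hcond]
        simp [List.append_assoc]
      · rw [if_neg he]
        have hbeq : (PySem.Str.len p.1 == n) = false := by
          apply beq_eq_false_iff_ne.mpr
          intro hh
          exact he hh.symm
        rw [if_neg (by intro h; rw [hbeq] at h; simp at h)]
    · rw [if_neg hc, ih]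
      have hcond : (PySem.Str.len p.1 == n && decide (1 ≤ n) && decide (n ≤ top)) = false := by
        by_cases he : PySem.Str.len p.1 = n
        · rw [he, beq_self_eq_true, Bool.true_and]
          rcases (by omega : ¬ (1 ≤ n) ∨ ¬ (n ≤ top)) with h | h <;> simp [h]
        · rw [beq_eq_false_iff_ne.mpr he]
          simp
      rw [if_neg (by intro h; rw [hcond] at h; cases h)]

-- B's whole body equals the groups of lengths top, top-1, …, 1 concatenated
lemma pv_B_canon (events sets : List String) (last : String) :
    pvBbody events sets last =
      ((PySem.List.pyRange (PySem.Str.len last) 0 (-1)).flatMap (pvGroupF events sets),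
       (PySem.List.pyRange (PySem.Str.len last) 0 (-1)).flatMap (pvGroupS events sets)) := by
  unfold pvBbody
  simp only []
  rw [PySem.List.foldl_congr_mem _ _
    (fun (out : List String × List String) n =>
      (out.1 ++ pvGroupF events sets n, out.2 ++ pvGroupS events sets n)) _ ?_]
  · rw [pv_extfold]; simp
  · intro out n hn
    rw [PySem.List.mem_pyRange_neg_one] at hn
    beta_reduce
    have hget := pv_bucket (PySem.Str.len last) (events.zip sets) PySem.Dict.empty n
    have d1 : decide ((1:Int) ≤ n) = true := decide_eq_true (by omega)
    have d2 : decide (n ≤ PySem.Str.len last) = true := decide_eq_true hn.2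
    have hfil : (events.zip sets).filter
        (fun p => PySem.Str.len p.1 == n && decide (1 ≤ n) && decide (n ≤ PySem.Str.len last))
        = (events.zip sets).filter (fun p => PySem.Str.len p.1 == n) := by
      apply List.filter_congr
      intro p _
      rw [d1, d2, Bool.and_true, Bool.and_true]
    rw [hfil] at hget
    have hget' :
        ((events.zip sets).foldl
          (fun d p =>
            if 1 ≤ PySem.Str.len p.1 ∧ PySem.Str.len p.1 ≤ PySem.Str.len last then
              d.modify (PySem.Str.len p.1) ([], []) (fun q => (q.1 ++ [p.1], q.2 ++ [p.2]))
            else d)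
          PySem.Dict.empty).getD n ([], [])
        = (pvGroupF events sets n, pvGroupS events sets n) := by
      rw [hget]
      simp [pvGroupF, pvGroupS]
    cases hc : ((events.zip sets).foldl
          (fun d p =>
            if 1 ≤ PySem.Str.len p.1 ∧ PySem.Str.len p.1 ≤ PySem.Str.len last then
              d.modify (PySem.Str.len p.1) ([], []) (fun q => (q.1 ++ [p.1], q.2 ++ [p.2]))
            else d)
          PySem.Dict.empty).contains n
    · rw [if_neg (by simp : ¬ false = true)]
      have h2 := (PySem.Dict.getD_of_not_contains _ (([], []) : List String × List String) hc).symm.trans hget'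
      have hF : pvGroupF events sets n = [] := (Prod.mk.injEq .. ▸ h2).1.symm
      have hS : pvGroupS events sets n = [] := (Prod.mk.injEq .. ▸ h2).2.symm
      rw [hF, hS]
      simp
    · rw [if_pos (rfl : true = true), hget']


-- ===== VERDICT (by name: the statement is the Claim_ definition above) =====
theorem reverse_events_and_sets_spec : Claim_equal_reverse_events_and_sets := by
  intro events sets _ hpre
  obtain ⟨hne, hp⟩ := hpre
  unfold Spec_reverse_events_and_sets reverse_events_and_sets reverse_events_and_sets_alt
  cases h : PySem.List.pyGet? events (-1) with
  | none => rfl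
  | some last =>
    have hlast : PySem.List.pyGetD events (-1) "" = last := by
      simp [PySem.List.pyGetD, h]
    rw [hlast] at hp
    show pvAbody events sets last = pvBbody events sets last
    rw [pv_A_canon events sets last hp, pv_B_canon events sets last,
        PySem.List.pyRange_neg_one_eq_reverse]
    norm_num
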